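-- pv_equiv track=rewrite | github.com/OmarElebiary/Hackdays_2019_SmartSearch | files.py | document_to_words
-- ===== SOURCE A (Python) =====
-- def document_to_words(doc):
--     doc = doc.split('\n')
--     doc_short = []
--     doc_words = []
--     doc_words_short = []
--     for d in doc:
--         if len(d) > 1: doc_short.append(d)
--     for d in doc_short:
--         doc_words += d.split(' ')
--     for d in doc_words:
--         if len(d) > 1: doc_words_short.append(d)
--     return doc_words_short
-- ===== SOURCE B (Python) =====
-- def document_to_words(doc):
--     return [w for w in doc.replace('\n', ' ').split(' ') if len(w) > 1]
-- ===== Notes on version B (the rewrite author's own statement) =====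
-- stated objective: simpler
-- what changed: Replaced the three-loop pipeline (split into lines, filter lines longer than 1, re-split each line on spaces, filter words) by a single flat tokenize-and-filter: normalize newlines to spaces, split once on the space character, keep tokens longer than one character; the line-length filter is provably inert since a line of length at most 1 contains no token longer than 1.
import Mathlib
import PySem

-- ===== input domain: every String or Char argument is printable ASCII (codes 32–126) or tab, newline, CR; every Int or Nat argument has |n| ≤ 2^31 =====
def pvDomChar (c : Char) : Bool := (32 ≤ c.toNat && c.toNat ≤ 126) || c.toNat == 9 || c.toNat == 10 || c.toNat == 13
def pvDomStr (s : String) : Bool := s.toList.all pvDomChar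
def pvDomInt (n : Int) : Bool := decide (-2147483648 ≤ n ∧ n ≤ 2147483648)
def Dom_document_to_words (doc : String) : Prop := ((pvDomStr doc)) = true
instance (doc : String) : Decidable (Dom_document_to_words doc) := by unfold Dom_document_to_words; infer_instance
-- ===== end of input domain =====

-- B replaces A's three-loop pipeline (split into lines, filter short lines, re-split each line
-- on spaces, filter short words) by one flat pass: normalize '\n' to ' ', split once, filter.
-- Objective: simpler (the dropped line filter is proved inert).

-- ===== PORT A =====
def document_to_words (doc : String) : List String :=
  let doc1 := (PySem.Str.split? doc "\n").getD []       -- sep "\n" is nonempty: split? is never none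
  let doc_short := doc1.foldl (fun acc d => if 1 < PySem.Str.len d then acc ++ [d] else acc) []
  let doc_words := doc_short.foldl (fun acc d => acc ++ (PySem.Str.split? d " ").getD []) []
  doc_words.foldl (fun acc d => if 1 < PySem.Str.len d then acc ++ [d] else acc) []

-- ===== PORT B =====
def document_to_words_alt (doc : String) : List String :=
  ((PySem.Str.split? (PySem.Str.replace doc "\n" " ") " ").getD []).filter
    (fun w => decide (1 < PySem.Str.len w))

-- ===== PRECONDITION & SPEC =====
def Spec_document_to_words (doc : String) (out : List String) : Prop := out = document_to_words_alt doc
instance (doc : String) (out : List String) : Decidable (Spec_document_to_words doc out) := by unfold Spec_document_to_words; infer_instance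

-- ===== CLAIM (what is proved, stated in full; the proofs are below) =====
def Claim_equal_document_to_words : Prop := ∀ (doc : String), Dom_document_to_words doc → Spec_document_to_words doc (document_to_words doc)

-- ===== LEMMAS AND PROOFS =====

def split1 (s : Char) : List Char → List (List Char)
  | [] => [[]]
  | c :: t => if c = s then [] :: split1 s t else (split1 s t).modifyHead (c :: ·)

theorem split1_ne_nil (s : Char) (l : List Char) : split1 s l ≠ [] := by
  cases l with
  | nil => simp [split1]
  | cons c t =>
    simp only [split1]
    split_ifs
    · simp
    · cases h : split1 s t with
      | nil => exact absurd h (split1_ne_nil s t)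
      | cons a b => simp

theorem splitOn_go_single (s : Char) (l : List Char) : ∀ (fuel : Nat), l.length < fuel →
    ∀ (cur : List Char) (acc : List (List Char)),
    PySem.Chars.splitOn.go [s] fuel l cur acc
      = acc.reverse ++ (split1 s l).modifyHead (cur.reverse ++ ·) := by
  induction l with
  | nil =>
    intro fuel hf cur acc
    cases fuel with
    | zero => omega
    | succ f => simp [PySem.Chars.splitOn.go, split1]
  | cons c t ih =>
    intro fuel hf cur acc
    cases fuel with
    | zero => omega
    | succ f =>
      simp only [List.length_cons] at hf
      by_cases hc : c = s
      · subst hc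
        simp only [PySem.Chars.splitOn.go, List.isPrefixOf, beq_self_eq_true, Bool.true_and,
          if_true]
        rw [show List.drop [c].length (c :: t) = t from by simp]
        rw [ih f (by omega) [] (cur.reverse :: acc)]
        cases h : split1 c t with
        | nil => exact absurd h (split1_ne_nil c t)
        | cons a b => simp [split1, h]
      · have hb : (s == c) = false := by simp [Ne.symm hc]
        simp only [PySem.Chars.splitOn.go, List.isPrefixOf, hb, Bool.false_and, Bool.false_eq_true,
          if_false]
        rw [ih f (by omega) (c :: cur) acc]
        simp only [split1, if_neg hc]
        cases h : split1 s t with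
        | nil => exact absurd h (split1_ne_nil s t)
        | cons a b => simp

theorem splitOn_single (s : Char) (cs : List Char) :
    PySem.Chars.splitOn cs [s] = split1 s cs := by
  unfold PySem.Chars.splitOn
  rw [splitOn_go_single s cs (cs.length + 1) (by omega) [] []]
  cases h : split1 s cs with
  | nil => exact absurd h (split1_ne_nil s cs)
  | cons a b => simp

theorem replace_go_single (o n : Char) (l : List Char) : ∀ (fuel : Nat), l.length ≤ fuel →
    ∀ (acc : List Char),
    PySem.Chars.replace.go [o] [n] fuel l acc
      = acc.reverse ++ l.map (fun c => if c = o then n else c) := by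
  induction l with
  | nil =>
    intro fuel hf acc
    cases fuel with
    | zero => simp [PySem.Chars.replace.go]
    | succ f => simp [PySem.Chars.replace.go]
  | cons c t ih =>
    intro fuel hf acc
    cases fuel with
    | zero => simp at hf
    | succ f =>
      simp only [List.length_cons] at hf
      by_cases hc : c = o
      · subst hc
        simp only [PySem.Chars.replace.go, List.isPrefixOf, beq_self_eq_true, Bool.true_and,
          List.isPrefixOf_nil_left, if_true]
        rw [show List.drop [c].length (c :: t) = t from by simp]
        rw [ih f (by omega) ([n].reverse ++ acc)]
        simp
      · have hb : (o == c) = false := by simp [Ne.symm hc]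
        simp only [PySem.Chars.replace.go, List.isPrefixOf, hb, Bool.false_and, Bool.false_eq_true,
          if_false]
        rw [ih f (by omega) (c :: acc)]
        simp [hc]

theorem replace_single (o n : Char) (cs : List Char) :
    PySem.Chars.replace cs [o] [n] = cs.map (fun c => if c = o then n else c) := by
  unfold PySem.Chars.replace
  rw [if_neg (by simp)]
  exact replace_go_single o n cs cs.length le_rfl []

theorem word_len_le (s : Char) (l : List Char) : ∀ w ∈ split1 s l, w.length ≤ l.length := by
  induction l with
  | nil => intro w hw; simp [split1] at hw; simp [hw]
  | cons c t ih =>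
    intro w hw
    simp only [split1] at hw
    split_ifs at hw with hc
    · rcases List.mem_cons.mp hw with h | h
      · simp [h]
      · exact le_trans (ih w h) (by simp)
    · cases h : split1 s t with
      | nil => exact absurd h (split1_ne_nil s t)
      | cons a b =>
        rw [h] at hw
        simp only [List.modifyHead_cons] at hw
        rcases List.mem_cons.mp hw with h2 | h2
        · have : a ∈ split1 s t := by rw [h]; exact List.mem_cons_self
          have := ih a this
          simp [h2]; omega
        · have : w ∈ split1 s t := by rw [h]; exact List.mem_cons_of_mem _ h2
          exact le_trans (ih w this) (by simp)

theorem split1_map_sub (cs : List Char) :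
    split1 ' ' (cs.map (fun c => if c = '\n' then ' ' else c))
      = (split1 '\n' cs).flatMap (fun l => split1 ' ' l) := by
  induction cs with
  | nil => simp [split1]
  | cons c t ih =>
    by_cases hn : c = '\n'
    · subst hn
      simp only [List.map_cons, if_pos rfl, split1, if_pos rfl]
      simp [split1, ih]
    · by_cases hs : c = ' '
      · subst hs
        simp only [List.map_cons, if_neg hn, split1, if_pos rfl, if_neg hn]
        cases h : split1 '\n' t with
        | nil => exact absurd h (split1_ne_nil '\n' t)
        | cons a b =>
          rw [h] at ih
          simp [split1, ih]
      · simp only [List.map_cons, if_neg hn, split1, if_neg hs, if_neg hn]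
        cases h : split1 '\n' t with
        | nil => exact absurd h (split1_ne_nil '\n' t)
        | cons a b =>
          rw [h] at ih
          cases h2 : split1 ' ' a with
          | nil => exact absurd h2 (split1_ne_nil ' ' a)
          | cons a2 b2 =>
            rw [ih]
            simp [split1, hs, h2]

theorem filter_flatMap_short (L : List (List Char)) :
    List.filter (fun w => decide (1 < w.length))
        ((L.filter (fun l => decide (1 < l.length))).flatMap (fun l => split1 ' ' l))
      = List.filter (fun w => decide (1 < w.length)) (L.flatMap (fun l => split1 ' ' l)) := by
  induction L with
  | nil => simp
  | cons a L ih =>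
    by_cases ha : 1 < a.length
    · simp only [List.filter_cons, decide_eq_true ha, if_true, List.flatMap_cons,
        List.filter_append, ih]
    · have hnil : List.filter (fun w => decide (1 < w.length)) (split1 ' ' a) = [] := by
        rw [List.filter_eq_nil_iff]
        intro w hw
        have := word_len_le ' ' a w hw
        simp only [decide_eq_true_eq, not_lt]
        omega
      simp [List.filter_cons, ha, hnil, ih, List.filter_append]

theorem splitNL (d : String) :
    (PySem.Str.split? d "\n").getD [] = (split1 '\n' d.toList).map String.ofList := by
  simp [PySem.Str.split?, PySem.Chars.split?, show ("\n".toList) = ['\n'] from rfl,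
    splitOn_single]

theorem splitSP (d : String) :
    (PySem.Str.split? d " ").getD [] = (split1 ' ' d.toList).map String.ofList := by
  simp [PySem.Str.split?, PySem.Chars.split?, show (" ".toList) = [' '] from rfl,
    splitOn_single]

-- ===== VERDICT (by name: the statement is the Claim_ definition above) =====
theorem document_to_words_spec : Claim_equal_document_to_words := by
  intro doc _
  unfold Spec_document_to_words
  unfold document_to_words document_to_words_alt
  rw [PySem.List.foldl_append_ite_eq_filter, PySem.List.foldl_append_eq_flatMap,
    PySem.List.foldl_append_ite_eq_filter]
  simp only [List.nil_append]
  rw [splitNL]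
  have hrep : (PySem.Str.replace doc "\n" " ").toList
      = doc.toList.map (fun c => if c = '\n' then ' ' else c) := by
    rw [PySem.Str.toList_replace]
    exact replace_single '\n' ' ' doc.toList
  have hB : (PySem.Str.split? (PySem.Str.replace doc "\n" " ") " ").getD []
      = ((split1 '\n' doc.toList).flatMap (fun l => split1 ' ' l)).map String.ofList := by
    rw [splitSP, hrep, split1_map_sub]
  rw [hB]
  rw [List.filter_map, List.flatMap_map]
  simp only [Function.comp_def, splitSP, String.toList_ofList, PySem.Str.len, Nat.one_lt_cast]
  rw [← List.map_flatMap]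
  rw [List.filter_map, List.filter_map]
  simp only [Function.comp_def, String.toList_ofList, PySem.Str.len, Nat.one_lt_cast]
  rw [filter_flatMap_short]
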